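-- pv_equiv track=rewrite | github.com/bermec/challenges | challenges_complete/challenge171_easy.py | hex_to_str
-- ===== SOURCE A (Python) =====
-- def hex_to_str(base16):
--     scale = 16
--     num_of_bits = 8
--
--     my_hexdata = base16
--     strng = ''
--     bin_out =  bin(int(my_hexdata, scale))[2:].zfill(num_of_bits)
--
--     for digit in bin_out:
--         if digit == '1':
--             strng += '='
--         else:
--             strng += ' '
--     return strng
-- ===== SOURCE B (Python) =====
-- _TABLE = [''.join('=' if (b >> k) & 1 else ' ' for k in reversed(range(8)))
--           for b in range(256)]
--
-- def hex_to_str(base16):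
--     n = int(base16, 16)
--     width = max(8, n.bit_length())
--     m = abs(n)
--     nbytes = (width + 7) // 8
--     body = ''.join(_TABLE[b] for b in m.to_bytes(nbytes, 'big'))
--     return body[len(body) - width:]
-- ===== Notes on version B (the rewrite author's own statement) =====
-- stated objective: faster
-- what changed: B converts the parsed integer to bytes and joins precomputed 8-character table rows per byte, instead of slicing and zero-padding the binary string representation and concatenating characters one by one in a Python-level loop.
-- intended difference: On hex strings that parse to a negative number of at least 8 bits, A slices only two characters off the minus-prefixed binary string, so a stray prefix character survives the padding and maps to a spurious leading space; B returns the bitmap of the magnitude with no stray character, which is the intended output. — e.g. on hex_to_str("-ff"): A returns " ========", B returns "========"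
import Mathlib
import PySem

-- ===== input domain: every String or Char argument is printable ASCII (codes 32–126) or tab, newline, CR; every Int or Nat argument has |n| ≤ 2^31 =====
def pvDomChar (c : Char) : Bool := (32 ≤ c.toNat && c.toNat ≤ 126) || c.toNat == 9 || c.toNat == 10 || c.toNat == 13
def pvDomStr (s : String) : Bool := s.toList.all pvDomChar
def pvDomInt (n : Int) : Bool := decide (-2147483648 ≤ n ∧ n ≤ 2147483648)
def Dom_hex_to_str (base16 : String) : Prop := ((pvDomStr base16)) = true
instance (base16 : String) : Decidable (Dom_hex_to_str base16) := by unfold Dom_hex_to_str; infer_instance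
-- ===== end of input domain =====

-- B replaces A's bin()-string slicing + zfill + per-character concatenation loop by a
-- byte-table join over to_bytes with the width computed from bit_length (measured faster).

-- ===== PORT A =====
-- A raises ValueError when int(base16, 16) fails to parse; Pre_hex_to_str excludes exactly those inputs.
def hex_to_str (base16 : String) : String :=
  match PySem.Int.ofStrBase? base16 16 with
  | none => ""   -- ValueError: unreachable under Pre_hex_to_str
  | some hexVal =>
    let binOut : List Char :=
      PySem.Chars.zfill (PySem.List.slice (PySem.Int.pyBin hexVal).toList (some 2) none) 8
    String.ofList (binOut.foldl (fun strng digit => strng ++ [if digit = '1' then '=' else ' ']) [])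

-- ===== PORT B =====
-- B-side helpers: the 256-entry byte table and m.to_bytes(nbytes, 'big')
-- (ported by hand as big-endian base-256 digits; exact here since m < 256^nbytes).
def pvTable : List (List Char) :=
  (List.range 256).map
    (fun b => ((List.range 8).reverse).map (fun k => if (b >>> k) &&& 1 == 1 then '=' else ' '))

def pvToBytesLE (m : Nat) : Nat → List Nat
  | 0 => []
  | nb + 1 => (m &&& 255) :: pvToBytesLE (m >>> 8) nb

def hex_to_str_alt (base16 : String) : String :=
  match PySem.Int.ofStrBase? base16 16 with
  | none => ""   -- ValueError: unreachable under Pre_hex_to_str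
  | some n =>
    let width := max 8 (PySem.Int.bitLength n)
    let m := n.natAbs
    let nbytes := (width + 7) / 8
    let body := ((pvToBytesLE m nbytes).reverse).flatMap (fun b => pvTable.getD b [])
    String.ofList (PySem.List.slice body (some ((body.length : Int) - (width : Int))) none)

-- ===== PRECONDITION & SPEC =====
-- Pre_ excludes exactly the inputs where int(base16, 16) raises ValueError.
def Pre_hex_to_str (base16 : String) : Prop := (PySem.Int.ofStrBase? base16 16).isSome = true
instance (base16 : String) : Decidable (Pre_hex_to_str base16) := by unfold Pre_hex_to_str; infer_instance
def pvWitness_hex_to_str : String := "ff"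

-- On hex strings that parse to a negative number of at least 8 bits, A slices only two
-- characters off the minus-prefixed binary string, so a stray prefix character survives the
-- padding and maps to a spurious leading space; B returns the bitmap of the magnitude with
-- no stray character, which is the intended output.
def D_hex_to_str (base16 : String) : Prop :=
  (PySem.Int.ofStrBase? base16 16).any
    (fun n => decide (n < 0) && decide (8 ≤ PySem.Int.bitLength n)) = true
instance (base16 : String) : Decidable (D_hex_to_str base16) := by unfold D_hex_to_str; infer_instance

def Spec_hex_to_str (base16 : String) (out : String) : Prop :=
  ¬ D_hex_to_str base16 → out = hex_to_str_alt base16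
instance (base16 : String) (out : String) : Decidable (Spec_hex_to_str base16 out) := by
  unfold Spec_hex_to_str; infer_instance

def pvDiffWitness_hex_to_str : String := "-ff"
def pvDiffWitnessOut_hex_to_str : String × String := (" ========", "========")

-- ===== CLAIM (what is proved, stated in full; the proofs are below) =====
def Claim_unchanged_hex_to_str : Prop := ∀ (base16 : String), Dom_hex_to_str base16 → Pre_hex_to_str base16 → Spec_hex_to_str base16 (hex_to_str base16)
def Claim_changed_hex_to_str : Prop := Dom_hex_to_str (pvDiffWitness_hex_to_str) ∧ Pre_hex_to_str (pvDiffWitness_hex_to_str) ∧ D_hex_to_str (pvDiffWitness_hex_to_str) ∧ hex_to_str (pvDiffWitness_hex_to_str) = pvDiffWitnessOut_hex_to_str.1 ∧ hex_to_str_alt (pvDiffWitness_hex_to_str) = pvDiffWitnessOut_hex_to_str.2 ∧ pvDiffWitnessOut_hex_to_str.1 ≠ pvDiffWitnessOut_hex_to_str.2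
def Claim_exact_hex_to_str : Prop := ∀ (base16 : String), Dom_hex_to_str base16 → Pre_hex_to_str base16 → D_hex_to_str base16 → hex_to_str base16 ≠ hex_to_str_alt base16

-- ===== LEMMAS AND PROOFS =====

-- the character maps of the two ports
def pvChar (d : Char) : Char := if d = '1' then '=' else ' '
def pvBit (m : Nat) (i : Nat) : Char := if (m >>> i) &&& 1 == 1 then '=' else ' '

-- A's accumulation loop is a map
theorem pv_foldl_map (cs acc : List Char) :
    cs.foldl (fun strng digit => strng ++ [if digit = '1' then '=' else ' ']) acc
      = acc ++ cs.map pvChar := by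
  induction cs generalizing acc with
  | nil => simp
  | cons c cs ih => simp [pvChar, ih]

-- binary digit list, most significant first (= bin(m) without the prefix)
def pvBits (m : Nat) : List Char :=
  if h : m < 2 then [Nat.digitChar m]
  else pvBits (m / 2) ++ [Nat.digitChar (m % 2)]
decreasing_by exact Nat.div_lt_self (by omega) (by omega)

theorem pv_toDigitsCore_eq (f : Nat) : ∀ (m : Nat) (l : List Char), m < f →
    Nat.toDigitsCore 2 f m l = pvBits m ++ l := by
  induction f with
  | zero => intro m l h; omega
  | succ f ih =>
    intro m l h
    rw [Nat.toDigitsCore]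
    by_cases h2 : m / 2 = 0
    · have hm : m < 2 := by omega
      rw [pvBits]
      simp [hm]
      congr 1
      omega
    · have hm : ¬ m < 2 := by omega
      rw [ih (m / 2) _ (by omega)]
      conv_rhs => rw [pvBits]
      simp [hm]

theorem pv_toDigits_eq (m : Nat) : Nat.toDigits 2 m = pvBits m := by
  have := pv_toDigitsCore_eq (m + 1) m [] (by omega)
  simpa [Nat.toDigits] using this

theorem pv_bits_mem (m : Nat) : ∀ c ∈ pvBits m, c = '0' ∨ c = '1' := by
  induction m using Nat.strong_induction_on with
  | _ m ih =>
    intro c hc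
    rw [pvBits] at hc
    by_cases h : m < 2
    · simp [h] at hc
      interval_cases m <;> simp_all [Nat.digitChar]
    · simp [h] at hc
      rcases hc with hc | hc
      · exact ih (m / 2) (Nat.div_lt_self (by omega) (by omega)) c hc
      · have : m % 2 < 2 := Nat.mod_lt m (by omega)
        subst hc
        interval_cases h : m % 2 <;> simp [Nat.digitChar]

theorem pv_bits_ne_nil (m : Nat) : pvBits m ≠ [] := by
  rw [pvBits]; split <;> simp

theorem pv_bits_length (m : Nat) :
    (pvBits m).length = if m = 0 then 1 else PySem.Int.bitLength (m : Int) := by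
  induction m using Nat.strong_induction_on with
  | _ m ih =>
    rw [pvBits]
    by_cases h : m < 2
    · interval_cases m <;> simp <;> decide
    · have h2 : m / 2 ≠ 0 := by omega
      have hbl := PySem.Int.bitLength_natCast (m := m) (by omega)
      simp [h, ih (m / 2) (Nat.div_lt_self (by omega) (by omega)), h2,
        show m ≠ 0 by omega, hbl]

theorem pv_bits_map (m : Nat) :
    (pvBits m).map pvChar = ((List.range (pvBits m).length).reverse).map (pvBit m) := by
  induction m using Nat.strong_induction_on with
  | _ m ih =>
    rw [pvBits]
    by_cases h : m < 2
    · interval_cases m <;> simp [pvChar, pvBit, Nat.digitChar] <;> decide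
    · have hq : m / 2 < m := Nat.div_lt_self (by omega) (by omega)
      simp only [h, dite_false, List.map_append, List.length_append, List.length_cons,
        List.length_nil, ih (m / 2) hq]
      rw [List.range_succ_eq_map]
      simp only [List.reverse_cons, List.reverse_append, List.map_append, List.map_reverse,
        List.map_map, List.map_cons, List.map_nil]
      congr 1
      · congr 1
        apply List.map_congr_left
        intro i _
        simp only [Function.comp_apply, pvBit, Nat.succ_eq_add_one]
        have : m >>> (i + 1) = (m / 2) >>> i := by
          simp [Nat.shiftRight_eq_div_pow, pow_succ, Nat.div_div_eq_div_mul, mul_comm]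
        rw [this]
      · have hb : m >>> 0 &&& 1 = m % 2 := by
          simp [Nat.shiftRight_eq_div_pow, Nat.and_one_is_mod]
        have hr : m % 2 < 2 := Nat.mod_lt m (by omega)
        simp only [pvChar, pvBit, hb]
        interval_cases hx : m % 2 <;> simp [Nat.digitChar]

-- high bits of m are zero above its bit length
theorem pv_bit_high (m i : Nat) (h : PySem.Int.bitLength (m : Int) ≤ i) : pvBit m i = ' ' := by
  have hlt : m < 2 ^ PySem.Int.bitLength (m : Int) := by
    simpa using PySem.Int.lt_two_pow_bitLength (m : Int)
  have : m < 2 ^ i := lt_of_lt_of_le hlt (Nat.pow_le_pow_right (by omega) h)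
  simp [pvBit, Nat.shiftRight_eq_div_pow, Nat.div_eq_of_lt this]

-- zfill on a list whose head is not a sign is a plain left pad
theorem pv_zfill_pad (cs : List Char) (hh : ∀ c, cs.head? = some c → c ≠ '+' ∧ c ≠ '-') :
    PySem.Chars.zfill cs 8 = List.replicate (8 - cs.length) '0' ++ cs := by
  by_cases h : (8 : Int) ≤ (cs.length : Int)
  · have h0 : 8 - cs.length = 0 := by omega
    simp [PySem.Chars.zfill, h, h0]
  · cases cs with
    | nil => simp [PySem.Chars.zfill]
    | cons c rest =>
      have hc := hh c rfl
      have hco : ¬ (c = '+' ∨ c = '-') := by tauto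
      simp only [PySem.Chars.zfill, h, if_false, hco]
      simp

-- the reversed-range map splits into a blank pad and the significant part
theorem pv_range_split (m L w : Nat) (hLw : L ≤ w)
    (hhigh : ∀ i, L ≤ i → pvBit m i = ' ') :
    ((List.range w).reverse).map (pvBit m)
      = List.replicate (w - L) ' ' ++ ((List.range L).reverse).map (pvBit m) := by
  have hw : w = L + (w - L) := by omega
  rw [hw, List.range_add, List.reverse_append, List.map_append]
  congr 1
  rw [List.eq_replicate_iff]
  constructor
  · simp only [List.length_map, List.length_reverse, List.length_range]
    omega
  · intro c hc
    simp only [List.mem_map, List.mem_reverse, List.mem_range] at hc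
    obtain ⟨i, hi, rfl⟩ := hc
    obtain ⟨j, _, rfl⟩ := hi
    exact hhigh (L + j) (by omega)

-- the heart of the equivalence, per parsed integer
theorem pv_key (n : Int) (hD : ¬(n < 0 ∧ 8 ≤ PySem.Int.bitLength n)) :
    (PySem.Chars.zfill (PySem.List.slice (PySem.Int.pyBin n).toList (some 2) none) 8).map pvChar
      = ((List.range (max 8 (PySem.Int.bitLength n))).reverse).map (pvBit n.natAbs) := by
  have hslice : PySem.List.slice (PySem.Int.pyBin n).toList (some 2) none
      = (PySem.Int.pyBin n).toList.drop 2 := by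
    simpa using PySem.List.slice_from (PySem.Int.pyBin n).toList (a := 2) (by omega)
  rw [hslice]
  by_cases hneg : n < 0
  · -- negative: bitLength ≤ 7, digit list is 'b' :: pvBits m
    have hbl : PySem.Int.bitLength n ≤ 7 := by
      by_contra hx
      exact hD ⟨hneg, by omega⟩
    have hm0 : n.natAbs ≠ 0 := by omega
    have hcast : ((n.natAbs : Nat) : Int) = -n := by omega
    have hbln : PySem.Int.bitLength (n.natAbs : Int) = PySem.Int.bitLength n := by
      rw [hcast]; exact PySem.Int.bitLength_neg n
    have hdrop : (PySem.Int.pyBin n).toList.drop 2 = 'b' :: pvBits n.natAbs := by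
      simp [PySem.Int.pyBin, PySem.Int.toBinChars0b, hneg, pv_toDigits_eq]
    have hL : (pvBits n.natAbs).length = PySem.Int.bitLength n := by
      rw [pv_bits_length, if_neg hm0, hbln]
    have hmax : max 8 (PySem.Int.bitLength n) = 8 := by omega
    rw [hdrop, pv_zfill_pad _ (by
      intro c hc
      simp only [List.head?_cons, Option.some.injEq] at hc
      subst hc
      exact ⟨by decide, by decide⟩)]
    rw [hmax, pv_range_split n.natAbs (PySem.Int.bitLength n) 8 (by omega)
      (fun i hi => pv_bit_high n.natAbs i (by omega))]
    rw [List.map_append, List.map_replicate, List.map_cons, pv_bits_map, hL]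
    have hc0 : pvChar '0' = ' ' := by decide
    have hcb : pvChar 'b' = ' ' := by decide
    rw [hc0, hcb, List.length_cons, hL]
    rw [show (8 - (PySem.Int.bitLength n + 1)) = (8 - PySem.Int.bitLength n) - 1 by omega]
    rw [show (8 - PySem.Int.bitLength n) = ((8 - PySem.Int.bitLength n) - 1) + 1 by omega,
      List.replicate_succ']
    simp
  · -- nonnegative
    have hge : 0 ≤ n := by omega
    have hcast : ((n.natAbs : Nat) : Int) = n := by omega
    have hbln : PySem.Int.bitLength (n.natAbs : Int) = PySem.Int.bitLength n := by rw [hcast]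
    have hdrop : (PySem.Int.pyBin n).toList.drop 2 = pvBits n.natAbs := by
      have htn : n.toNat = n.natAbs := by omega
      simp [PySem.Int.pyBin, PySem.Int.toBinChars0b, not_lt.mpr hge, hneg, htn, pv_toDigits_eq]
    have hLval : (pvBits n.natAbs).length
        = if n.natAbs = 0 then 1 else PySem.Int.bitLength n := by
      rw [pv_bits_length, hbln]
    have hbl0 : n.natAbs = 0 → PySem.Int.bitLength n = 0 := by
      intro h0
      rw [← hbln, h0]
      decide
    have hLge : PySem.Int.bitLength n ≤ (pvBits n.natAbs).length := by
      rw [hLval]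
      split
      · next h0 => have := hbl0 h0; omega
      · omega
    have hLle : (pvBits n.natAbs).length ≤ max 8 (PySem.Int.bitLength n) := by
      rw [hLval]
      split <;> omega
    rw [hdrop, pv_zfill_pad _ (by
      intro c hc
      have hmem : c ∈ pvBits n.natAbs := by
        cases hx : pvBits n.natAbs with
        | nil => exact absurd hx (pv_bits_ne_nil n.natAbs)
        | cons d t =>
          rw [hx] at hc
          simp only [List.head?_cons, Option.some.injEq] at hc
          subst hc
          simp [hx]
      rcases pv_bits_mem n.natAbs c hmem with h | h <;> subst h
      · exact ⟨by decide, by decide⟩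
      · exact ⟨by decide, by decide⟩)]
    rw [pv_range_split n.natAbs (pvBits n.natAbs).length (max 8 (PySem.Int.bitLength n)) hLle
      (fun i hi => pv_bit_high n.natAbs i (by omega))]
    rw [List.map_append, List.map_replicate, pv_bits_map]
    have hc0 : pvChar '0' = ' ' := by decide
    rw [hc0]
    congr 2
    by_cases h0 : n.natAbs = 0
    · have := hbl0 h0
      simp [hLval, h0, this]
    · have : PySem.Int.bitLength n = (pvBits n.natAbs).length := by simp [hLval, h0]
      omega

-- pvBit through testBit, byte masking and shifting
theorem pv_bit_testBit (x i : Nat) : pvBit x i = if x.testBit i then '=' else ' ' := by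
  simp [pvBit, Nat.testBit, Nat.shiftRight_eq_div_pow, Nat.and_one_is_mod, Nat.one_and_eq_mod_two]

theorem pv_bit_shift (m s i : Nat) : pvBit (m >>> s) i = pvBit m (s + i) := by
  rw [pv_bit_testBit, pv_bit_testBit, Nat.testBit_shiftRight]

theorem pv_bit_and255 (m k : Nat) (hk : k < 8) : pvBit (m &&& 255) k = pvBit m k := by
  rw [pv_bit_testBit, pv_bit_testBit, Nat.testBit_and]
  have h255 : Nat.testBit 255 k = true := by interval_cases k <;> decide
  simp [h255]

-- the table row of a byte value
theorem pv_table_getD (b : Nat) (hb : b < 256) :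
    pvTable.getD b [] = ((List.range 8).reverse).map (pvBit b) := by
  unfold pvTable
  rw [List.getD_eq_getElem?_getD, List.getElem?_map, List.getElem?_range hb]
  rfl

-- the joined table rows of the big-endian bytes are the reversed-range bit map
theorem pv_bytes_flat (nb : Nat) : ∀ m : Nat,
    ((pvToBytesLE m nb).reverse).flatMap (fun b => pvTable.getD b [])
      = ((List.range (8 * nb)).reverse).map (pvBit m) := by
  induction nb with
  | zero => intro m; simp [pvToBytesLE]
  | succ nb ih =>
    intro m
    rw [pvToBytesLE]
    simp only [List.reverse_cons, List.flatMap_append, List.flatMap_cons, List.flatMap_nil,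
      List.append_nil, ih (m >>> 8)]
    rw [pv_table_getD (m &&& 255) (by have := Nat.and_le_right (n := m) (m := 255); omega)]
    rw [show 8 * (nb + 1) = 8 + 8 * nb by ring, List.range_add, List.reverse_append,
      List.map_append]
    congr 1
    · rw [← List.map_reverse, List.map_map]
      apply List.map_congr_left
      intro i _
      simp only [Function.comp_apply]
      rw [pv_bit_shift]
    · apply List.map_congr_left
      intro k hk
      rw [List.mem_reverse, List.mem_range] at hk
      exact pv_bit_and255 m k hk

-- dropping from the front of a reversed-range map shortens the range
theorem pv_drop_revRange (f : Nat → Char) (W d : Nat) (h : d ≤ W) :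
    List.drop d (((List.range W).reverse).map f) = ((List.range (W - d)).reverse).map f := by
  rw [show W = (W - d) + d by omega, List.range_add, List.reverse_append, List.map_append,
    List.drop_left' (by simp), show W - d + d - d = W - d by omega]

-- B's branch value, in closed form
theorem pv_alt_body (m W : Nat) :
    PySem.List.slice
        (((pvToBytesLE m ((W + 7) / 8)).reverse).flatMap (fun b => pvTable.getD b []))
        (some (((((pvToBytesLE m ((W + 7) / 8)).reverse).flatMap
            (fun b => pvTable.getD b [])).length : Int) - (W : Int))) none
      = ((List.range W).reverse).map (pvBit m) := by
  rw [pv_bytes_flat]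
  have hlen : (((List.range (8 * ((W + 7) / 8))).reverse).map (pvBit m)).length
      = 8 * ((W + 7) / 8) := by simp
  have hW : W ≤ 8 * ((W + 7) / 8) := by omega
  rw [hlen, PySem.List.slice_from _ (by push_cast; omega)]
  rw [show (((8 * ((W + 7) / 8) : Nat) : Int) - (W : Int)).toNat = 8 * ((W + 7) / 8) - W by omega]
  rw [pv_drop_revRange (pvBit m) _ _ (by omega), show 8 * ((W + 7) / 8) - (8 * ((W + 7) / 8) - W) = W by omega]

-- each port's value once the parse has succeeded
theorem pv_A_eq (base16 : String) (n : Int) (hx : PySem.Int.ofStrBase? base16 16 = some n) :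
    hex_to_str base16
      = String.ofList ((PySem.Chars.zfill
          (PySem.List.slice (PySem.Int.pyBin n).toList (some 2) none) 8).map pvChar) := by
  unfold hex_to_str
  rw [hx]
  exact congrArg String.ofList (by rw [pv_foldl_map, List.nil_append])

theorem pv_B_eq (base16 : String) (n : Int) (hx : PySem.Int.ofStrBase? base16 16 = some n) :
    hex_to_str_alt base16
      = String.ofList (((List.range (max 8 (PySem.Int.bitLength n))).reverse).map
          (pvBit n.natAbs)) := by
  unfold hex_to_str_alt
  rw [hx]
  exact congrArg String.ofList (pv_alt_body n.natAbs (max 8 (PySem.Int.bitLength n)))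

-- length of each port's output list, used for the tightness theorem
theorem pv_ofList_len_ne {l1 l2 : List Char} (h : l1.length ≠ l2.length) :
    String.ofList l1 ≠ String.ofList l2 := by
  intro hx
  apply h
  have := congrArg String.toList hx
  simpa using congrArg List.length this

-- ===== VERDICT (by name: the statement is the Claim_ definition above) =====
theorem hex_to_str_spec : Claim_unchanged_hex_to_str := by
  intro base16 _ hpre hnD
  cases hx : PySem.Int.ofStrBase? base16 16 with
  | none => simp [Pre_hex_to_str, hx] at hpre
  | some n =>
    have hD : ¬(n < 0 ∧ 8 ≤ PySem.Int.bitLength n) := by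
      intro ⟨h1, h2⟩
      exact hnD (by simp [D_hex_to_str, hx, h1, h2])
    rw [pv_A_eq base16 n hx, pv_B_eq base16 n hx, pv_key n hD]

set_option maxHeartbeats 2000000 in
theorem hex_to_str_changed : Claim_changed_hex_to_str := by
  unfold Claim_changed_hex_to_str; decide

theorem hex_to_str_tight : Claim_exact_hex_to_str := by
  intro base16 _ hpre hD
  cases hx : PySem.Int.ofStrBase? base16 16 with
  | none => simp [Pre_hex_to_str, hx] at hpre
  | some n =>
    simp only [D_hex_to_str, hx, Option.any_some, Bool.and_eq_true, decide_eq_true_eq] at hD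
    obtain ⟨hneg, hbl⟩ := hD
    rw [pv_A_eq base16 n hx, pv_B_eq base16 n hx]
    apply pv_ofList_len_ne
    have hm0 : n.natAbs ≠ 0 := by omega
    have hcast : ((n.natAbs : Nat) : Int) = -n := by omega
    have hbln : PySem.Int.bitLength (n.natAbs : Int) = PySem.Int.bitLength n := by
      rw [hcast]; exact PySem.Int.bitLength_neg n
    have hslice : PySem.List.slice (PySem.Int.pyBin n).toList (some 2) none
        = 'b' :: pvBits n.natAbs := by
      have h1 : PySem.List.slice (PySem.Int.pyBin n).toList (some 2) none
          = (PySem.Int.pyBin n).toList.drop 2 := by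
        simpa using PySem.List.slice_from (PySem.Int.pyBin n).toList (a := 2) (by omega)
      rw [h1]
      simp [PySem.Int.pyBin, PySem.Int.toBinChars0b, hneg, pv_toDigits_eq]
    rw [hslice]
    have hlz := PySem.Chars.length_zfill ('b' :: pvBits n.natAbs) 8
    have hLb : (pvBits n.natAbs).length = PySem.Int.bitLength n := by
      rw [pv_bits_length, if_neg hm0, hbln]
    simp only [List.length_map, hlz, List.length_cons, hLb, List.length_reverse,
      List.length_range]
    omega
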